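-- pv_equiv track=rewrite | github.com/MarioTimoc21/VeridionHack | Words.py | fuzzy_match_concepts
-- ===== SOURCE A (Python) =====
-- CONCEPT_CATEGORIES = {
--     "elemental": ["water", "flame", "fire", "ice", "wind", "stone", "rock", "earth", "magma"],
--     "celestial": ["star", "moon", "sun", "supernova", "black hole", "neutron star", "supermassive black hole", "gamma-ray burst"],
--     "natural_phenomena": ["earthquake", "storm", "tsunami", "volcano", "sandstorm", "tectonic shift"],
--     "biological": ["virus", "bacteria", "disease", "plague", "cure", "vaccine"],
--     "weapons": ["sword", "shield", "gun", "nuclear bomb", "laser"],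
--     "abstract": ["time", "fate", "karma", "peace", "war", "logic", "enlightenment", "human spirit", "entropy", "rebirth"],
--     "materials": ["feather", "coal", "pebble", "leaf", "paper", "twig", "rope"]
-- }
--
-- def fuzzy_match_concepts(word1, word2):
--     """Check if two words belong to similar conceptual categories."""
--     word1_lower = word1.lower()
--     word2_lower = word2.lower()
--
--     # Check if they're in the same category
--     for category, words in CONCEPT_CATEGORIES.items():
--         if word1_lower in words and word2_lower in words:
--             return True
--
--     # Check for substring matches
--     if word1_lower in word2_lower or word2_lower in word1_lower:
--         return True
--
--     return False
-- ===== SOURCE B (Python) =====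
-- WORD_GROUP = {
--     "water": 0, "flame": 0, "fire": 0, "ice": 0, "wind": 0, "stone": 0, "rock": 0, "earth": 0, "magma": 0, "star": 1, "moon": 1, "sun": 1, "supernova": 1, "black hole": 1, "neutron star": 1, "supermassive black hole": 1, "gamma-ray burst": 1, "earthquake": 2, "storm": 2, "tsunami": 2, "volcano": 2, "sandstorm": 2, "tectonic shift": 2, "virus": 3, "bacteria": 3, "disease": 3, "plague": 3, "cure": 3, "vaccine": 3, "sword": 4, "shield": 4, "gun": 4, "nuclear bomb": 4, "laser": 4, "time": 5, "fate": 5, "karma": 5, "peace": 5, "war": 5, "logic": 5, "enlightenment": 5, "human spirit": 5, "entropy": 5, "rebirth": 5, "feather": 6, "coal": 6, "pebble": 6, "leaf": 6, "paper": 6, "twig": 6, "rope": 6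
-- }
--
-- def fuzzy_match_concepts(word1, word2):
--     """Check if two words belong to similar conceptual categories."""
--     w1 = word1.lower()
--     w2 = word2.lower()
--     g1 = WORD_GROUP.get(w1)
--     if g1 is not None and g1 == WORD_GROUP.get(w2):
--         return True
--     return w1 in w2 or w2 in w1
-- ===== Notes on version B (the rewrite author's own statement) =====
-- stated objective: idiomatic
-- what changed: B replaces the per-call scan over CONCEPT_CATEGORIES by a precomputed flat dict mapping each concept word to an integer group id, so the same-category test becomes two dict lookups compared for equality before the substring fallback.
import Mathlib
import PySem

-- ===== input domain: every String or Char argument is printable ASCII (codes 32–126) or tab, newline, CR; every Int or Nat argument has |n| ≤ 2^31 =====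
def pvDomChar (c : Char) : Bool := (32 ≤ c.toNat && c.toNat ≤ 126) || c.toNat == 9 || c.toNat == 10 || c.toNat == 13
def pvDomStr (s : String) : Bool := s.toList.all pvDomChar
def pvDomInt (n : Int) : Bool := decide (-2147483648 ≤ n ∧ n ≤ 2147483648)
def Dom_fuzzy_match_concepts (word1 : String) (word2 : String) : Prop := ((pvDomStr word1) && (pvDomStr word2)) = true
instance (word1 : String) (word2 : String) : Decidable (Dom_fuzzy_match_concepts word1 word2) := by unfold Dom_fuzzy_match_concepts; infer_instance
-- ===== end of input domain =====

-- B replaces A's per-call category scan by a precomputed flat word->group-id dict, compared by lookup equality (idiomatic).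


-- ===== PORT A =====
def CONCEPT_CATEGORIES : List (String × List String) := [
  ("elemental", ["water", "flame", "fire", "ice", "wind", "stone", "rock", "earth", "magma"]),
  ("celestial", ["star", "moon", "sun", "supernova", "black hole", "neutron star", "supermassive black hole", "gamma-ray burst"]),
  ("natural_phenomena", ["earthquake", "storm", "tsunami", "volcano", "sandstorm", "tectonic shift"]),
  ("biological", ["virus", "bacteria", "disease", "plague", "cure", "vaccine"]),
  ("weapons", ["sword", "shield", "gun", "nuclear bomb", "laser"]),
  ("abstract", ["time", "fate", "karma", "peace", "war", "logic", "enlightenment", "human spirit", "entropy", "rebirth"]),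
  ("materials", ["feather", "coal", "pebble", "leaf", "paper", "twig", "rope"])]

def fuzzy_match_concepts (word1 : String) (word2 : String) : Bool :=
  let word1_lower := PySem.Str.lower word1
  let word2_lower := PySem.Str.lower word2
  -- for category, words in CONCEPT_CATEGORIES.items(): if w1 in words and w2 in words: return True
  if CONCEPT_CATEGORIES.any (fun p => p.2.contains word1_lower && p.2.contains word2_lower) then true
  else if PySem.Str.isIn word1_lower word2_lower || PySem.Str.isIn word2_lower word1_lower then true
  else false

-- ===== PORT B =====
-- flat literal dict: each concept word -> the integer id of its (unique) group
def WORD_GROUP : PySem.Dict String Int := PySem.Dict.mk [("water", 0), ("flame", 0), ("fire", 0), ("ice", 0), ("wind", 0), ("stone", 0), ("rock", 0), ("earth", 0), ("magma", 0), ("star", 1), ("moon", 1), ("sun", 1), ("supernova", 1), ("black hole", 1), ("neutron star", 1), ("supermassive black hole", 1), ("gamma-ray burst", 1), ("earthquake", 2), ("storm", 2), ("tsunami", 2), ("volcano", 2), ("sandstorm", 2), ("tectonic shift", 2), ("virus", 3), ("bacteria", 3), ("disease", 3), ("plague", 3), ("cure", 3), ("vaccine", 3), ("sword", 4), ("shield",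 4), ("gun", 4), ("nuclear bomb", 4), ("laser", 4), ("time", 5), ("fate", 5), ("karma", 5), ("peace", 5), ("war", 5), ("logic", 5), ("enlightenment", 5), ("human spirit", 5), ("entropy", 5), ("rebirth", 5), ("feather", 6), ("coal", 6), ("pebble", 6), ("leaf", 6), ("paper", 6), ("twig", 6), ("rope", 6)]

def fuzzy_match_concepts_alt (word1 : String) (word2 : String) : Bool :=
  let w1 := PySem.Str.lower word1
  let w2 := PySem.Str.lower word2
  let g1 := PySem.Dict.get? WORD_GROUP w1
  if g1.isSome && g1 == PySem.Dict.get? WORD_GROUP w2 then true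
  else PySem.Str.isIn w1 w2 || PySem.Str.isIn w2 w1

-- ===== PRECONDITION & SPEC =====
def Spec_fuzzy_match_concepts (word1 : String) (word2 : String) (out : Bool) : Prop := out = fuzzy_match_concepts_alt word1 word2
instance (word1 : String) (word2 : String) (out : Bool) : Decidable (Spec_fuzzy_match_concepts word1 word2 out) := by unfold Spec_fuzzy_match_concepts; infer_instance

-- ===== CLAIM =====
def Claim_equal_fuzzy_match_concepts : Prop := ∀ (word1 : String) (word2 : String), Dom_fuzzy_match_concepts word1 word2 → Spec_fuzzy_match_concepts word1 word2 (fuzzy_match_concepts word1 word2)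

-- ===== LEMMAS AND PROOFS =====

-- WORD_GROUP's entries are exactly the concept words paired with their category's index
def pairsOf : List (String × Int) :=
  (PySem.List.enumerate CONCEPT_CATEGORIES 0).flatMap (fun q => q.2.2.map (fun w => (w, q.1)))

theorem items_eq : (PySem.Dict.items WORD_GROUP) = pairsOf := by rfl

theorem nodup_keys : (PySem.Dict.keys WORD_GROUP).Nodup := by decide

theorem lookup_iff (w : String) (g : Int) :
    PySem.Dict.get? WORD_GROUP w = some g ↔
      ∃ (k : Nat) (h : k < CONCEPT_CATEGORIES.length),
        g = (k : Int) ∧ w ∈ (CONCEPT_CATEGORIES[k]).2 := by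
  rw [PySem.Dict.get?_eq_some_iff_mem_items _ _ _ nodup_keys, items_eq]
  simp only [pairsOf, List.mem_flatMap, List.mem_map, PySem.List.mem_enumerate_iff]
  constructor
  · rintro ⟨q, ⟨k, hk, rfl⟩, x, hx, hxe⟩
    obtain ⟨rfl, rfl⟩ := Prod.mk.injEq .. ▸ hxe
    exact ⟨k, hk, by omega, hx⟩
  · rintro ⟨k, hk, rfl, hw⟩
    exact ⟨(0 + (k : Int), CONCEPT_CATEGORIES[k]), ⟨k, hk, rfl⟩, w, hw, by simp⟩

theorem core_iff (w1 w2 : String) :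
    (CONCEPT_CATEGORIES.any (fun p => p.2.contains w1 && p.2.contains w2) = true)
      ↔ ∃ g, PySem.Dict.get? WORD_GROUP w1 = some g ∧ PySem.Dict.get? WORD_GROUP w2 = some g := by
  simp only [List.any_eq_true, Bool.and_eq_true, List.contains_eq_mem, decide_eq_true_eq, lookup_iff]
  constructor
  · rintro ⟨p, hp, h1, h2⟩
    obtain ⟨k, hk, hpe⟩ := List.mem_iff_getElem.mp hp
    exact ⟨(k : Int), ⟨k, hk, rfl, hpe ▸ h1⟩, ⟨k, hk, rfl, hpe ▸ h2⟩⟩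
  · rintro ⟨g, ⟨k, hk, rfl, h1⟩, j, hj, hje, h2⟩
    exact ⟨CONCEPT_CATEGORIES[k], List.getElem_mem hk, h1, by
      have hjk : j = k := by exact_mod_cast hje.symm
      subst hjk
      exact h2⟩

-- ===== VERDICT =====
theorem fuzzy_match_concepts_spec : Claim_equal_fuzzy_match_concepts := by
  intro word1 word2 _
  unfold Spec_fuzzy_match_concepts fuzzy_match_concepts fuzzy_match_concepts_alt
  set w1 := PySem.Str.lower word1
  set w2 := PySem.Str.lower word2
  by_cases h : CONCEPT_CATEGORIES.any (fun p => p.2.contains w1 && p.2.contains w2) = true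
  · obtain ⟨g, hg1, hg2⟩ := (core_iff w1 w2).mp h
    simp only [h, if_true, hg1, hg2, Option.isSome_some, beq_self_eq_true, Bool.and_self, if_true]
  · have hB : ((PySem.Dict.get? WORD_GROUP w1).isSome && (PySem.Dict.get? WORD_GROUP w1 == PySem.Dict.get? WORD_GROUP w2)) = false := by
      rw [Bool.and_eq_false_iff]
      cases hc1 : PySem.Dict.get? WORD_GROUP w1 with
      | none => exact Or.inl rfl
      | some g =>
          right
          rw [beq_eq_false_iff_ne]
          intro he
          exact h ((core_iff w1 w2).mpr ⟨g, hc1, he.symm⟩)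
    simp only [h, if_false, hB, Bool.false_eq_true, if_false]
    cases hs : (PySem.Str.isIn w1 w2 || PySem.Str.isIn w2 w1) <;> decide
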